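-- pv_equiv track=rewrite | github.com/ankitchauhan22/website-audit-tool | services/version_service.py | infer_primary_platform
-- ===== SOURCE A (Python) =====
-- PLATFORM_PRIORITY = [
--     "Drupal",
--     "WordPress",
--     "Joomla",
--     "Magento",
--     "TYPO3",
--     "Craft CMS",
--     "Ghost",
--     "ButterCMS",
--     "Sitefinity",
--     "SharePoint",
--     "CivicPlus Web Central",
--     "CivicPlus HCMS",
--     "CivicLive",
--     "ProdCity",
--     "TerminalFour",
--     "Granicus govAccess",
--     "OpenCities",
--     "CakePHP",
--     "Zend Framework",
--     "Shopify",
--     "Laravel",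
--     "Next.js",
--     "Nuxt",
--     "Astro",
--     "Docusaurus",
--     "Gatsby",
--     "Angular",
--     "AngularJS",
--     "Vue.js",
--     "React",
--     "SvelteKit",
--     "Svelte",
--     "Sapper",
--     "Wix",
--     "Squarespace",
--     "Webflow",
-- ]
--
-- def infer_primary_platform(cms: str, technology_stack) -> str:
--     """Choose the most meaningful platform or framework to summarize in the report."""
--     if cms and cms != "No strong CMS fingerprint detected":
--         return cms
--
--     detected_names = {item["name"] for item in (technology_stack or [])}
--     for platform in PLATFORM_PRIORITY:
--         if platform in detected_names:
--             return platform
--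
--     return cms or "No strong CMS fingerprint detected"
-- ===== SOURCE B (Python) =====
-- PLATFORM_PRIORITY = [
--     "Drupal",
--     "WordPress",
--     "Joomla",
--     "Magento",
--     "TYPO3",
--     "Craft CMS",
--     "Ghost",
--     "ButterCMS",
--     "Sitefinity",
--     "SharePoint",
--     "CivicPlus Web Central",
--     "CivicPlus HCMS",
--     "CivicLive",
--     "ProdCity",
--     "TerminalFour",
--     "Granicus govAccess",
--     "OpenCities",
--     "CakePHP",
--     "Zend Framework",
--     "Shopify",
--     "Laravel",
--     "Next.js",
--     "Nuxt",
--     "Astro",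
--     "Docusaurus",
--     "Gatsby",
--     "Angular",
--     "AngularJS",
--     "Vue.js",
--     "React",
--     "SvelteKit",
--     "Svelte",
--     "Sapper",
--     "Wix",
--     "Squarespace",
--     "Webflow",
-- ]
--
-- _PLATFORM_RANK = {name: i for i, name in enumerate(PLATFORM_PRIORITY)}
--
-- def infer_primary_platform(cms: str, technology_stack) -> str:
--     """Choose the most meaningful platform or framework to summarize in the report."""
--     if cms and cms != "No strong CMS fingerprint detected":
--         return cms
--
--     best = None
--     for item in (technology_stack or []):
--         rank = _PLATFORM_RANK.get(item["name"])
--         if rank is not None and (best is None or rank < best):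
--             best = rank
--
--     if best is not None:
--         return PLATFORM_PRIORITY[best]
--     return cms or "No strong CMS fingerprint detected"
-- ===== Notes on version B (the rewrite author's own statement) =====
-- stated objective: alternative
-- what changed: Instead of building a set of detected names and scanning the fixed priority list for the first member, B iterates once over technology_stack keeping the minimum priority rank (via a name-to-index dict) and indexes the priority list with it.
import Mathlib
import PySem

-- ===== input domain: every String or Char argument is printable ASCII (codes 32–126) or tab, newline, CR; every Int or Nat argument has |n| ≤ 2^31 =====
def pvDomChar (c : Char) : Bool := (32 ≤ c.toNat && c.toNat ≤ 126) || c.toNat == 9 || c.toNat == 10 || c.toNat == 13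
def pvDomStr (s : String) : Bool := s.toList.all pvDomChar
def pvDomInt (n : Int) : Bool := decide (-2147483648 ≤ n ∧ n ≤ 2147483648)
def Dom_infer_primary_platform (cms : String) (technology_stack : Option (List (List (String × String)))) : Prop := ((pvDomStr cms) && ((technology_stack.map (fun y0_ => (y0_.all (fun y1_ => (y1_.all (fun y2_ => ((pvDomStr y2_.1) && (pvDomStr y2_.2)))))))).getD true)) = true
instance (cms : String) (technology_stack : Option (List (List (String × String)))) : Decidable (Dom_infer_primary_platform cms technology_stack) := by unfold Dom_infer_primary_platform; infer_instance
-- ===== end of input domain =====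

-- B replaces A's scan of the fixed priority list over a set of detected names by a single
-- running-minimum pass over technology_stack using a name→rank dictionary (objective: alternative).

def PLATFORM_PRIORITY : List String :=
  ["Drupal", "WordPress", "Joomla", "Magento", "TYPO3", "Craft CMS", "Ghost", "ButterCMS",
   "Sitefinity", "SharePoint", "CivicPlus Web Central", "CivicPlus HCMS", "CivicLive",
   "ProdCity", "TerminalFour", "Granicus govAccess", "OpenCities", "CakePHP",
   "Zend Framework", "Shopify", "Laravel", "Next.js", "Nuxt", "Astro", "Docusaurus",
   "Gatsby", "Angular", "AngularJS", "Vue.js", "React", "SvelteKit", "Svelte", "Sapper",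
   "Wix", "Squarespace", "Webflow"]

-- ===== PORT A =====
-- item["name"] is a first-match assoc lookup; '.getD ""' totalizes the KeyError case,
-- which Pre_infer_primary_platform excludes.
def infer_primary_platform (cms : String) (technology_stack : Option (List (List (String × String)))) : String :=
  if cms ≠ "" ∧ cms ≠ "No strong CMS fingerprint detected" then cms
  else
    let detected : PySem.Set String :=
      PySem.Set.ofList ((technology_stack.getD []).map
        (fun item => ((PySem.Dict.mk item).get? "name").getD ""))
    match PLATFORM_PRIORITY.find? (fun p => PySem.Set.contains detected p) with
    | some p => p
    | none => if cms ≠ "" then cms else "No strong CMS fingerprint detected"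

-- ===== PORT B =====
-- {name: i for i, name in enumerate(PLATFORM_PRIORITY)}
def PLATFORM_RANK : PySem.Dict String Int :=
  PySem.Dict.ofList ((PySem.List.enumerate PLATFORM_PRIORITY).map (fun p => (p.2, p.1)))

def infer_primary_platform_alt (cms : String) (technology_stack : Option (List (List (String × String)))) : String :=
  if cms ≠ "" ∧ cms ≠ "No strong CMS fingerprint detected" then cms
  else
    let best : Option Int :=
      (technology_stack.getD []).foldl
        (fun best item =>
          match PLATFORM_RANK.get? (((PySem.Dict.mk item).get? "name").getD "") with
          | some rank =>
            match best with
            | none => some rank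
            | some b => some (if rank < b then rank else b)
          | none => best)
        none
    match best with
    | some r => (PySem.List.pyGet? PLATFORM_PRIORITY r).getD ""
    | none => if cms ≠ "" then cms else "No strong CMS fingerprint detected"

-- ===== PRECONDITION & SPEC =====
-- Pre_ excludes exactly the inputs where A raises KeyError: the cms guard does not fire
-- and some technology_stack item lacks the key "name" (B raises KeyError there too).
def Pre_infer_primary_platform (cms : String) (technology_stack : Option (List (List (String × String)))) : Prop :=
  (cms ≠ "" ∧ cms ≠ "No strong CMS fingerprint detected") ∨
    ∀ item ∈ technology_stack.getD [], (PySem.Dict.mk item).contains "name" = true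
instance (cms : String) (technology_stack : Option (List (List (String × String)))) : Decidable (Pre_infer_primary_platform cms technology_stack) := by unfold Pre_infer_primary_platform; infer_instance

def pvWitness_infer_primary_platform : String × (Option (List (List (String × String)))) :=
  ("", some [[("name", "React")], [("name", "Vue.js")]])

def Spec_infer_primary_platform (cms : String) (technology_stack : Option (List (List (String × String)))) (out : String) : Prop := out = infer_primary_platform_alt cms technology_stack
instance (cms : String) (technology_stack : Option (List (List (String × String)))) (out : String) : Decidable (Spec_infer_primary_platform cms technology_stack out) := by unfold Spec_infer_primary_platform; infer_instance

-- ===== CLAIM (what is proved, stated in full; the proofs are below) =====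
def Claim_equal_infer_primary_platform : Prop := ∀ (cms : String) (technology_stack : Option (List (List (String × String)))), Dom_infer_primary_platform cms technology_stack → Pre_infer_primary_platform cms technology_stack → Spec_infer_primary_platform cms technology_stack (infer_primary_platform cms technology_stack)

-- ===== LEMMAS AND PROOFS =====

-- option-min combinator: one loop step of B
def omin (a : Option Int) (b : Option Int) : Option Int :=
  match b with
  | none => a
  | some r => match a with
    | none => some r
    | some x => some (min x r)

-- rank of n in L: index of first occurrence, as an Int
def rkOf (L : List String) (n : String) : Option Int :=
  match L with
  | [] => none
  | a :: L' => if a == n then some 0 else (rkOf L' n).map (· + 1)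

lemma omin_right_none (a : Option Int) : omin a none = a := rfl
lemma omin_left_apply (a : Option Int) (r : Int) :
    omin a (some r) = some ((a.map (fun x => min x r)).getD r) := by
  cases a <;> rfl

lemma rkOf_nonneg (L : List String) (n : String) (k : Int) (h : rkOf L n = some k) : 0 ≤ k := by
  induction L generalizing k with
  | nil => simp [rkOf] at h
  | cons a L' ih =>
    simp only [rkOf] at h
    split at h
    · simp only [Option.some.injEq] at h; omega
    · rcases Option.map_eq_some_iff.mp h with ⟨j, hj, rfl⟩
      have := ih j hj; omega

lemma get?_mk_enum (L : List String) (s : Int) (n : String) :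
    (PySem.Dict.mk ((PySem.List.enumerate L s).map (fun p => (p.2, p.1)))).get? n
      = (rkOf L n).map (fun k => s + k) := by
  induction L generalizing s with
  | nil => simp [PySem.List.enumerate_nil, rkOf, PySem.Dict.get?]
  | cons a L' ih =>
    rw [PySem.List.enumerate_cons]
    simp only [List.map_cons, PySem.Dict.get?_mk_cons, rkOf]
    cases h : (a == n) with
    | true => simp
    | false =>
      simp only [Bool.false_eq_true, if_false, ih (s + 1), Option.map_map]
      congr 1; funext k; simp; omega

set_option maxRecDepth 40000 in
lemma rank_get (n : String) : PLATFORM_RANK.get? n = rkOf PLATFORM_PRIORITY n := by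
  have h : PLATFORM_RANK = PySem.Dict.mk ((PySem.List.enumerate PLATFORM_PRIORITY 0).map (fun p => (p.2, p.1))) := by rfl
  rw [h, get?_mk_enum]
  cases rkOf PLATFORM_PRIORITY n <;> simp

-- the fold with a `some` accumulator is a plain min-fold over the collected ranks
lemma foldl_omin_some (rk : String → Option Int) (l : List String) (b : Int) :
    l.foldl (fun a n => omin a (rk n)) (some b)
      = some ((l.filterMap rk).foldl min b) := by
  induction l generalizing b with
  | nil => rfl
  | cons n l' ih =>
    simp only [List.foldl_cons]
    cases h : rk n with
    | none => simp only [List.filterMap_cons, h, omin_right_none, ih]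
    | some r =>
      simp only [List.filterMap_cons, h, omin_left_apply, Option.map_some, Option.getD_some, ih]
      rfl

lemma G_eq (rk : String → Option Int) (names : List String) :
    names.foldl (fun a n => omin a (rk n)) none = (names.filterMap rk).min? := by
  induction names with
  | nil => rfl
  | cons n ns ih =>
    simp only [List.foldl_cons]
    cases h : rk n with
    | none => simp only [List.filterMap_cons, h, omin_right_none, ih]
    | some r =>
      simp only [List.filterMap_cons, h, omin_left_apply, Option.map_none, Option.getD_none,
        foldl_omin_some]
      rfl

lemma min?_map_add_one (l : List Int) :
    (l.map (fun x => x + 1)).min? = l.min?.map (fun x => x + 1) := by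
  cases h : l.min? with
  | none => rw [List.min?_eq_none_iff] at h; simp [h]
  | some m =>
    rw [List.min?_eq_some_iff] at h
    rw [Option.map_some]
    rw [List.min?_eq_some_iff]
    constructor
    · exact List.mem_map.mpr ⟨m, h.1, rfl⟩
    · intro b hb
      rcases List.mem_map.mp hb with ⟨x, hx, rfl⟩
      have := h.2 x hx; omega

lemma find_eq_min (L names : List String) :
    L.find? (fun p => names.contains p)
      = ((names.filterMap (rkOf L)).min?).map (fun r => (PySem.List.pyGet? L r).getD "") := by
  induction L with
  | nil =>
    have : names.filterMap (rkOf []) = [] := by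
      apply List.filterMap_eq_nil_iff.mpr; intro n _; rfl
    simp [this]
  | cons a L' ih =>
    rw [List.find?_cons]
    by_cases hmem : a ∈ names
    · have hpa : names.contains a = true := by simpa using hmem
      simp only [hpa]
      -- 0 is a collected rank and all collected ranks are ≥ 0, so the min is 0
      have h0 : (0 : Int) ∈ names.filterMap (rkOf (a :: L')) := by
        apply List.mem_filterMap.mpr
        exact ⟨a, hmem, by simp [rkOf]⟩
      have hmin : (names.filterMap (rkOf (a :: L'))).min? = some 0 := by
        rw [List.min?_eq_some_iff]
        refine ⟨h0, ?_⟩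
        intro b hb
        rcases List.mem_filterMap.mp hb with ⟨n, _, hn⟩
        exact rkOf_nonneg _ _ _ hn
      rw [hmin]
      simp
    · have hpa : names.contains a = false := by simpa using hmem
      simp only [hpa]
      have hcong : names.filterMap (rkOf (a :: L'))
          = (names.filterMap (rkOf L')).map (fun x => x + 1) := by
        rw [List.map_filterMap]
        apply List.filterMap_congr
        intro n hn
        have hne : (a == n) = false := by
          simp only [beq_eq_false_iff_ne]; rintro rfl; exact hmem hn
        simp [rkOf, hne]
      rw [hcong, min?_map_add_one, ih]
      cases h : (names.filterMap (rkOf L')).min? with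
      | none => rfl
      | some r =>
        have hr : 0 ≤ r := by
          have hmem' := List.min?_mem h
          rcases List.mem_filterMap.mp hmem' with ⟨n, _, hn⟩
          exact rkOf_nonneg _ _ _ hn
        simp only [Option.map_some]
        congr 1
        obtain ⟨m, rfl⟩ : ∃ m : Nat, r = (m : Int) := ⟨r.toNat, by omega⟩
        have h1 : ((m : Int) + 1) = ((m + 1 : Nat) : Int) := by push_cast; ring
        rw [h1, PySem.List.pyGet?_natCast, PySem.List.pyGet?_natCast]
        rfl

-- B's loop step is omin of the looked-up rank
lemma step_eq :
    (fun (best : Option Int) (item : List (String × String)) =>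
      match PLATFORM_RANK.get? (((PySem.Dict.mk item).get? "name").getD "") with
      | some rank =>
        match best with
        | none => some rank
        | some b => some (if rank < b then rank else b)
      | none => best)
    = fun best item => omin best (rkOf PLATFORM_PRIORITY (((PySem.Dict.mk item).get? "name").getD "")) := by
  funext b it
  rw [rank_get]
  cases rkOf PLATFORM_PRIORITY (((PySem.Dict.mk it).get? "name").getD "") with
  | none => rfl
  | some r =>
    cases b with
    | none => rfl
    | some x => simp [omin, min_def]; split_ifs <;> omega

lemma contains_pred (names : List String) :
    (fun p => PySem.Set.contains (PySem.Set.ofList names) p) = (fun p => names.contains p) := by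
  funext p
  by_cases h : p ∈ names <;>
    simp [PySem.Set.contains_eq_listContains, PySem.Set.mem_ofList, h]

theorem infer_primary_platform_spec : Claim_equal_infer_primary_platform := by
  intro cms ts _ _
  unfold Spec_infer_primary_platform infer_primary_platform infer_primary_platform_alt
  by_cases hg : cms ≠ "" ∧ cms ≠ "No strong CMS fingerprint detected"
  · simp [hg]
  · simp only [hg, if_false]
    rw [step_eq, ← List.foldl_map
      (f := fun item => ((PySem.Dict.mk item).get? "name").getD "")
      (g := fun a n => omin a (rkOf PLATFORM_PRIORITY n)),
      G_eq, contains_pred, find_eq_min]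
    cases ((ts.getD []).map (fun item => ((PySem.Dict.mk item).get? "name").getD "")).filterMap
        (rkOf PLATFORM_PRIORITY) |>.min? with
    | none => rfl
    | some r => rfl
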